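-- pv_equiv track=rewrite | github.com/Boolector/boolector | examples/generators/queens/queensbv.py | ite_encode_eq_rec
-- ===== SOURCE A (Python) =====
-- def ite_encode_eq_rec (list, pos, k):
--   assert list != None
--   assert pos >= 0
--
--   if pos == len(list):
--     if k == 0:
--       return "true"
--     return "false"
--   if len(list) - pos < k or k < 0:
--     return "false"
--   result = "(if_then_else (= " + list[pos] + " bv1[1]) "
--   result += ite_encode_eq_rec (list, pos + 1, k - 1) + " "
--   result += ite_encode_eq_rec (list, pos + 1, k) + ")"
--   return result
-- ===== SOURCE B (Python) =====
-- def ite_encode_eq_rec(list, pos, k):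
--     assert list != None
--     assert pos >= 0
--     n = len(list)
--     if pos >= n:
--         return "true" if pos == n and k == 0 else "false"
--     if k < 0 or n - pos < k:
--         return "false"
--     # bottom-up tabulation of f(p, kk) for p from n down to pos; only the band
--     # k - (p - pos) <= kk <= k is ever consulted, cells outside it are "false"
--     row = ["true" if kk == 0 else "false" for kk in range(k + 1)]
--     for p in range(n - 1, pos - 1, -1):
--         row = ["false" if kk < k - (p - pos) or n - p < kk else
--                "(if_then_else (= " + list[p] + " bv1[1]) "
--                + (row[kk - 1] if kk > 0 else "false") + " " + row[kk] + ")"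
--                for kk in range(k + 1)]
--     return row[k]
-- ===== Notes on version B (the rewrite author's own statement) =====
-- stated objective: alternative
-- what changed: Replaces the top-down binary recursion on (pos,k) with a bottom-up dynamic-programming tabulation: a row of k+1 strings is rebuilt for p from n-1 down to pos, so the recursion tree becomes an iterative table fill producing the identical string.
import Mathlib
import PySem

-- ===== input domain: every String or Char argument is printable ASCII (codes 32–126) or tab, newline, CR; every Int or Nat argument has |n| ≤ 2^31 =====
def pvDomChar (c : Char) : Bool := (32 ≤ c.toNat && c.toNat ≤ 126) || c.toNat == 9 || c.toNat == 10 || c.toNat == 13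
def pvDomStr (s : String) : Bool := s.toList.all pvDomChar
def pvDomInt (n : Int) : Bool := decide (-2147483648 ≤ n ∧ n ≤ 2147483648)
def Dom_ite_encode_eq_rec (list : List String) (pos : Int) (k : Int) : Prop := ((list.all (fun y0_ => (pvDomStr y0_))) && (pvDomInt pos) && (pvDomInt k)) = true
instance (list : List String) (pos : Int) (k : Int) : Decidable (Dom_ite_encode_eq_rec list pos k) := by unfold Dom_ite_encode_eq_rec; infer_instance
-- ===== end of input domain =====

-- B replaces A's top-down recursion by a bottom-up DP over rows of a banded (pos..k) table; same string.
-- A raises AssertionError for pos < 0; Pre_ excludes exactly those inputs.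

-- ===== PORT A =====
-- literal port of A's recursion; pos is the (nonnegative, per the assert) position as a Nat
def iteRecA (list : List String) (pos : Nat) (k : Int) : String :=
  if pos = list.length then
    (if k = 0 then "true" else "false")
  else if (list.length : Int) - pos < k ∨ k < 0 then "false"
  else
    "(if_then_else (= " ++ list.getD pos "" ++ " bv1[1]) "
      ++ iteRecA list (pos + 1) (k - 1) ++ " "
      ++ iteRecA list (pos + 1) k ++ ")"
termination_by list.length - pos
decreasing_by all_goals omega

def ite_encode_eq_rec (list : List String) (pos : Int) (k : Int) : String :=
  if pos < 0 then ""   -- assert pos >= 0 raises here; excluded by Pre_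
  else iteRecA list pos.toNat k

-- ===== PORT B =====
-- one DP step: rebuild the row for position p from the row for position p+1
def stepB (list : List String) (n kN : Nat) (k pos : Int) (row : List String) (p : Int) : List String :=
  (List.range (kN + 1)).map (fun kk : Nat =>
    if (kk : Int) < k - (p - pos) ∨ (n : Int) - p < (kk : Int) then "false"
    else
      "(if_then_else (= " ++ PySem.List.pyGetD list p "" ++ " bv1[1]) "
        ++ (if 0 < kk then row.getD (kk - 1) "" else "false") ++ " "
        ++ row.getD kk "" ++ ")")

def ite_encode_eq_rec_alt (list : List String) (pos : Int) (k : Int) : String :=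
  if pos < 0 then ""   -- assert pos >= 0 raises here; excluded by Pre_
  else
    let n := list.length
    if (n : Int) ≤ pos then (if pos = n ∧ k = 0 then "true" else "false")
    else if k < 0 ∨ (n : Int) - pos < k then "false"
    else
      let kN := k.toNat
      let row0 := (List.range (kN + 1)).map (fun kk : Nat => if kk = 0 then "true" else "false")
      let row := (PySem.List.pyRange ((n : Int) - 1) (pos - 1) (-1)).foldl (stepB list n kN k pos) row0
      row.getD kN ""

-- ===== PRECONDITION & SPEC =====
-- Pre_ excludes exactly the inputs on which A's 'assert pos >= 0' raises AssertionError.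
def Pre_ite_encode_eq_rec (list : List String) (pos : Int) (k : Int) : Prop := 0 ≤ pos
instance (list : List String) (pos : Int) (k : Int) : Decidable (Pre_ite_encode_eq_rec list pos k) := by unfold Pre_ite_encode_eq_rec; infer_instance
def pvWitness_ite_encode_eq_rec : List String × Int × Int := (["x0", "x1", "x2"], 0, 2)

def Spec_ite_encode_eq_rec (list : List String) (pos : Int) (k : Int) (out : String) : Prop := out = ite_encode_eq_rec_alt list pos k
instance (list : List String) (pos : Int) (k : Int) (out : String) : Decidable (Spec_ite_encode_eq_rec list pos k out) := by unfold Spec_ite_encode_eq_rec; infer_instance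

-- ===== CLAIM (what is proved, stated in full; the proofs are below) =====
def Claim_equal_ite_encode_eq_rec : Prop := ∀ (list : List String) (pos : Int) (k : Int), Dom_ite_encode_eq_rec list pos k → Pre_ite_encode_eq_rec list pos k → Spec_ite_encode_eq_rec list pos k (ite_encode_eq_rec list pos k)

-- ===== LEMMAS AND PROOFS =====

-- A returns "false" for any negative k
lemma iteRecA_neg (list : List String) (pos : Nat) (k : Int) (hk : k < 0) :
    iteRecA list pos k = "false" := by
  unfold iteRecA
  split
  · simp [show k ≠ 0 by omega]
  · simp [hk]

-- the intended value of a row cell: inside the band it is A's value, outside it is "false"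
def cellB (list : List String) (k pos : Int) (p : Nat) (kk : Nat) : String :=
  if (kk : Int) < k - ((p : Int) - pos) then "false" else iteRecA list p (kk : Int)

-- getD on a row that is a map over List.range
lemma getD_map_range_cell (list : List String) (kN : Nat) (f : Nat → String) (j : Nat)
    (h : j < kN + 1) :
    ((List.range (kN + 1)).map f).getD j "" = f j := by
  rw [List.getD_eq_getElem?_getD, List.getElem?_map, List.getElem?_range h]
  rfl

-- one DP step is correct: it turns the row of cells at position q+1 into the row at position q
lemma stepB_correct (list : List String) (kN q : Nat) (k pos : Int) (hq : q < list.length) :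
    stepB list list.length kN k pos
        ((List.range (kN + 1)).map (cellB list k pos (q + 1))) (q : Int)
      = (List.range (kN + 1)).map (cellB list k pos q) := by
  unfold stepB
  apply List.map_congr_left
  intro kk hkk
  rw [List.mem_range] at hkk
  rw [PySem.List.pyGetD_natCast]
  by_cases hband : (kk : Int) < k - ((q : Int) - pos)
  · rw [if_pos (Or.inl hband)]
    unfold cellB
    rw [if_pos hband]
  · by_cases hb : (list.length : Int) - (q : Int) < (kk : Int)
    · rw [if_pos (Or.inr hb)]
      unfold cellB
      rw [if_neg hband, iteRecA]
      rw [if_neg (by omega : ¬ (q = list.length))]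
      rw [if_pos (Or.inl (by omega : (list.length : Int) - ((q : Nat) : Int) < (kk : Int)))]
    · rw [if_neg (by tauto)]
      have h1 : (if 0 < kk then
          ((List.range (kN + 1)).map (cellB list k pos (q + 1))).getD (kk - 1) ""
          else "false") = iteRecA list (q + 1) ((kk : Int) - 1) := by
        by_cases h0 : 0 < kk
        · rw [if_pos h0, getD_map_range_cell list kN _ (kk - 1) (by omega)]
          unfold cellB
          rw [if_neg (by push_cast [Nat.cast_sub (show 1 ≤ kk by omega)]; omega),
            Nat.cast_sub (show 1 ≤ kk by omega), Nat.cast_one]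
        · rw [if_neg h0, show kk = 0 by omega,
            iteRecA_neg list (q + 1) (((0 : Nat) : Int) - 1) (by norm_num)]
      have h2 : ((List.range (kN + 1)).map (cellB list k pos (q + 1))).getD kk ""
          = iteRecA list (q + 1) (kk : Int) := by
        rw [getD_map_range_cell list kN _ kk hkk]
        unfold cellB
        rw [if_neg (by push_cast; omega)]
      rw [h1, h2]
      unfold cellB
      rw [if_neg hband]
      conv_rhs => rw [iteRecA]
      rw [if_neg (by omega : ¬ (q = list.length))]
      rw [if_neg (by push_neg; exact ⟨by omega, by omega⟩ :
        ¬ ((list.length : Int) - ((q : Nat) : Int) < (kk : Int) ∨ (kk : Int) < 0))]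

-- fold invariant: folding the steps for q, q-1, ..., p turns the row at q+1 into the row at p
lemma fold_inv (list : List String) (kN : Nat) (k pos p : Int) (hp : 0 ≤ p) :
    ∀ (m : Nat) (q : Int), q = p - 1 + m → q ≤ (list.length : Int) - 1 →
    (PySem.List.pyRange q (p - 1) (-1)).foldl (stepB list list.length kN k pos)
        ((List.range (kN + 1)).map (cellB list k pos (q + 1).toNat))
      = (List.range (kN + 1)).map (cellB list k pos p.toNat) := by
  intro m
  induction m with
  | zero =>
    intro q hq hqn
    rw [PySem.List.pyRange_neg_one_eq_nil (by omega)]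
    simp only [List.foldl_nil]
    have h1 : (q + 1).toNat = p.toNat := by omega
    rw [h1]
  | succ m ih =>
    intro q hq hqn
    rw [PySem.List.pyRange_neg_one_cons (by omega)]
    rw [List.foldl_cons]
    have hqc : q = ((q.toNat : Nat) : Int) := by omega
    have hstep : stepB list list.length kN k pos
        ((List.range (kN + 1)).map (cellB list k pos (q + 1).toNat)) q
        = (List.range (kN + 1)).map (cellB list k pos ((q - 1) + 1).toNat) := by
      have h1 : (q + 1).toNat = q.toNat + 1 := by omega
      have h2 : ((q - 1) + 1).toNat = q.toNat := by omega
      rw [h1, h2]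
      conv_lhs => rw [hqc]
      exact stepB_correct list kN q.toNat k pos (by omega)
    rw [hstep]
    exact ih (q - 1) (by omega) (by omega)

-- the initial row equals the cells at position n (when the band does not cut it)
lemma row0_eq (list : List String) (kN : Nat) (k pos : Int)
    (hk : k ≤ (list.length : Int) - pos) :
    (List.range (kN + 1)).map (fun kk : Nat => if kk = 0 then "true" else "false")
      = (List.range (kN + 1)).map (cellB list k pos list.length) := by
  apply List.map_congr_left
  intro kk hkk
  rw [List.mem_range] at hkk
  unfold cellB
  rw [if_neg (by omega : ¬ ((kk : Int) < k - (((list.length : Nat) : Int) - pos))), iteRecA]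
  simp only [if_pos rfl]
  by_cases h : kk = 0
  · simp [h]
  · simp [h]

-- ===== VERDICT (by name: the statement is the Claim_ definition above) =====
theorem ite_encode_eq_rec_spec : Claim_equal_ite_encode_eq_rec := by
  intro list pos k _ hpre
  unfold Spec_ite_encode_eq_rec ite_encode_eq_rec ite_encode_eq_rec_alt
  have hpre' : 0 ≤ pos := hpre
  rw [if_neg (by omega), if_neg (by omega)]
  by_cases hge : (list.length : Int) ≤ pos
  · rw [if_pos hge, iteRecA]
    by_cases heq : pos = (list.length : Int)
    · rw [if_pos (by omega)]
      by_cases hk : k = 0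
      · simp [hk, heq]
      · simp [hk, heq]
    · rw [if_neg (by omega)]
      rw [if_pos (by omega : (list.length : Int) - (pos.toNat : Nat) < k ∨ k < 0)]
      simp [show ¬(pos = (list.length : Int) ∧ k = 0) by tauto]
  · rw [if_neg hge]
    by_cases hkb : k < 0 ∨ (list.length : Int) - pos < k
    · rw [if_pos hkb, iteRecA]
      rw [if_neg (by omega), if_pos (by omega : (list.length : Int) - (pos.toNat : Nat) < k ∨ k < 0)]
    · rw [if_neg hkb]
      push_neg at hkb
      simp only
      rw [row0_eq list k.toNat k pos (by omega)]
      have hrow := fold_inv list k.toNat k pos pos hpre'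
        (list.length - pos).toNat ((list.length : Int) - 1) (by omega) (by omega)
      have hn : (((list.length : Int) - 1) + 1).toNat = list.length := by omega
      rw [hn] at hrow
      rw [hrow, getD_map_range_cell list k.toNat _ k.toNat (by omega)]
      unfold cellB
      rw [if_neg (by omega)]
      congr 1
      omega
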